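-- pv_equiv track=rewrite | github.com/Golam-Tawhid/CSE221 | Lab 7/Task 2/task2.py | maximize_tasks
-- ===== SOURCE A (Python) =====
-- def maximize_tasks(tasks, m):
--     tasks.sort(key=lambda x: x[1])
--
--     selected = [[] for j in range(m)]
--
--     for i in tasks:
--         for j in range(m):
--             start, end = i
--
--             if not selected[j] or start >= selected[j][-1][1]:
--                 selected[j].append((start, end))
--
--                 break
--
--     return sum(len(task) for task in selected)
-- ===== SOURCE B (Python) =====
-- def maximize_tasks(tasks, m):
--     # machine-major: repeatedly run classic greedy interval scheduling on the
--     # remaining tasks (one round per machine), instead of task-major first-fit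
--     tasks.sort(key=lambda x: x[1])
--     remaining = tasks
--     placed = 0
--     rounds = 0
--     while rounds < m and remaining:
--         cnt = 0
--         rest = []
--         last = None
--         for s, e in remaining:
--             if last is None or s >= last:
--                 cnt += 1
--                 last = e
--             else:
--                 rest.append((s, e))
--         placed += cnt
--         remaining = rest
--         rounds += 1
--     return placed
-- ===== Notes on version B (the rewrite author's own statement) =====
-- stated objective: faster
-- what changed: Machine-major rounds: B repeatedly runs classic greedy interval scheduling on the sorted remaining tasks (one pass per machine, stopping when no tasks remain), instead of A's task-major first-fit scan over m per-machine task lists; B never allocates the m per-machine lists.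
import Mathlib
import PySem

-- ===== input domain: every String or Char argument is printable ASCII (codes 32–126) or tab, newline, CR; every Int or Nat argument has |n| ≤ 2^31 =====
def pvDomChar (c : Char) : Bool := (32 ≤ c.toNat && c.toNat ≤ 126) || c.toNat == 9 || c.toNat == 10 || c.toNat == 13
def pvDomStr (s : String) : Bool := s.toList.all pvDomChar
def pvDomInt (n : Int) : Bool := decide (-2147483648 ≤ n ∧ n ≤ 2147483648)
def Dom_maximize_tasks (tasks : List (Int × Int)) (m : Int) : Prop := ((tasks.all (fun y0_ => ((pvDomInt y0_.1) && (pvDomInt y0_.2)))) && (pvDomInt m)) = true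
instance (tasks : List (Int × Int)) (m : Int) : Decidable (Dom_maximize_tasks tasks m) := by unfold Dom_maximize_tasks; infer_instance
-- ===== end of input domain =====

-- B replaces A's task-major first-fit over m per-machine lists by machine-major rounds of
-- classic greedy interval scheduling on the remaining tasks (objective: alternative).
-- Both Pythons sort `tasks` in place; the equivalence proved here is about the return value.

-- ===== PORT A =====
-- inner `for j in range(m): ... break`: put task (s,e) into the first list that is
-- empty or whose last task ends at or before s; if none accepts, drop it.
def placeA (i : Int × Int) : List (List (Int × Int)) → List (List (Int × Int))
  | [] => []
  | sel :: rest =>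
    match sel.getLast? with
    | none => (sel ++ [i]) :: rest
    | some p => if i.1 ≥ p.2 then (sel ++ [i]) :: rest else sel :: placeA i rest

def maximize_tasks (tasks : List (Int × Int)) (m : Int) : Int :=
  let sorted := PySem.List.sorted tasks (fun x => x.2) false
  let selected : List (List (Int × Int)) := List.replicate m.toNat []
  let final := sorted.foldl (fun sel i => placeA i sel) selected
  final.foldl (fun acc task => acc + (task.length : Int)) 0

-- ===== PORT B =====
-- one round of greedy interval scheduling: returns (number taken, tasks left, in order)
def scanB (last : Option Int) : List (Int × Int) → Int × List (Int × Int)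
  | [] => (0, [])
  | (s, e) :: tl =>
    match last with
    | none => let r := scanB (some e) tl; (r.1 + 1, r.2)
    | some l =>
      if s ≥ l then let r := scanB (some e) tl; (r.1 + 1, r.2)
      else let r := scanB last tl; (r.1, (s, e) :: r.2)

-- `while rounds < m and remaining:` — at most m rounds, stop when nothing remains
def roundsB : Nat → List (Int × Int) → Int → Int
  | 0, _, placed => placed
  | k + 1, remaining, placed =>
    match remaining with
    | [] => placed
    | _ :: _ =>
      let r := scanB none remaining
      roundsB k r.2 (placed + r.1)

def maximize_tasks_alt (tasks : List (Int × Int)) (m : Int) : Int :=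
  roundsB m.toNat (PySem.List.sorted tasks (fun x => x.2) false) 0

-- ===== PRECONDITION & SPEC =====
def Spec_maximize_tasks (tasks : List (Int × Int)) (m : Int) (out : Int) : Prop := out = maximize_tasks_alt tasks m
instance (tasks : List (Int × Int)) (m : Int) (out : Int) : Decidable (Spec_maximize_tasks tasks m out) := by unfold Spec_maximize_tasks; infer_instance

-- ===== CLAIM (what is proved, stated in full; the proofs are below) =====
def Claim_equal_maximize_tasks : Prop := ∀ (tasks : List (Int × Int)) (m : Int), Dom_maximize_tasks tasks m → Spec_maximize_tasks tasks m (maximize_tasks tasks m)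

-- ===== LEMMAS AND PROOFS =====

def sumLens (sels : List (List (Int × Int))) : Int :=
  (sels.map (fun t => (t.length : Int))).sum

def lastEnd (sel : List (Int × Int)) : Option Int := sel.getLast?.map Prod.snd

theorem foldl_placeA_nil (ts : List (Int × Int)) :
    ts.foldl (fun sel i => placeA i sel) [] = [] := by
  induction ts with
  | nil => rfl
  | cons h t ih => simpa [placeA] using ih

theorem head_machine (ts : List (Int × Int)) (sel : List (Int × Int))
    (rest : List (List (Int × Int))) :
    sumLens (ts.foldl (fun s i => placeA i s) (sel :: rest))
      = sel.length + (scanB (lastEnd sel) ts).1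
        + sumLens ((scanB (lastEnd sel) ts).2.foldl (fun s i => placeA i s) rest) := by
  induction ts generalizing sel rest with
  | nil => simp [scanB, sumLens]
  | cons h t ih =>
    obtain ⟨s, e⟩ := h
    match hl : sel.getLast? with
    | none =>
      have hle : lastEnd sel = none := by simp [lastEnd, hl]
      have hle' : lastEnd (sel ++ [(s, e)]) = some e := by
        simp [lastEnd]
      simp only [List.foldl_cons, placeA, hl, scanB, hle]
      rw [ih (sel ++ [(s, e)]) rest]
      simp [hle']
      omega
    | some p =>
      have hle : lastEnd sel = some p.2 := by simp [lastEnd, hl]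
      by_cases hc : s ≥ p.2
      · have hle' : lastEnd (sel ++ [(s, e)]) = some e := by
          simp [lastEnd]
        simp only [List.foldl_cons, placeA, hl, scanB, hle, if_pos hc]
        rw [ih (sel ++ [(s, e)]) rest]
        simp [hle']
        omega
      · simp only [List.foldl_cons, placeA, hl, if_neg hc, scanB, hle]
        rw [ih sel (placeA (s, e) rest)]
        simp [hle]

theorem roundsB_acc (k : Nat) (ts : List (Int × Int)) (p : Int) :
    roundsB k ts p = p + roundsB k ts 0 := by
  induction k generalizing ts p with
  | zero => simp [roundsB]
  | succ k ih =>
    cases ts with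
    | nil => simp [roundsB]
    | cons h t =>
      simp only [roundsB]
      rw [ih _ (0 + _), ih]
      omega

theorem main_eq (k : Nat) (ts : List (Int × Int)) :
    sumLens (ts.foldl (fun s i => placeA i s) (List.replicate k [])) = roundsB k ts 0 := by
  induction k generalizing ts with
  | zero => simp [foldl_placeA_nil, sumLens, roundsB]
  | succ k ih =>
    cases ts with
    | nil => simp [sumLens, roundsB]
    | cons h t =>
      rw [List.replicate_succ, head_machine]
      simp only [roundsB]
      rw [roundsB_acc, ← ih]
      simp [lastEnd, sumLens]

theorem foldl_len_eq_sumLens (l : List (List (Int × Int))) (c : Int) :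
    l.foldl (fun acc t => acc + (t.length : Int)) c = c + sumLens l := by
  induction l generalizing c with
  | nil => simp [sumLens]
  | cons h t ih => simp [sumLens, ih]; ring

-- ===== VERDICT (by name: the statement is the Claim_ definition above) =====
theorem maximize_tasks_spec : Claim_equal_maximize_tasks := by
  intro tasks m _
  unfold Spec_maximize_tasks maximize_tasks maximize_tasks_alt
  rw [foldl_len_eq_sumLens]
  simpa using main_eq m.toNat (PySem.List.sorted tasks (fun x => x.2) false)
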